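-- pv_equiv track=rewrite | github.com/JontAmazon/yatzy_solver | helper.py | get_sum_upper_section
-- ===== SOURCE A (Python) =====
-- def get_sum_upper_section(scoreboard):
--     """(Used to check if the player gets the bonus)."""
--     upper_section = ["ones", "twos", "threes", "fours", "fives", "sixes"]
--     sum = 0
--     for combo, value in scoreboard.items():
--         if combo in upper_section:
--             if scoreboard[combo]:
--                 sum += value
--     return sum
-- ===== SOURCE B (Python) =====
-- def get_sum_upper_section(scoreboard):
--     """(Used to check if the player gets the bonus)."""
--     return (scoreboard.get("ones", 0)
--             + scoreboard.get("twos", 0)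
--             + scoreboard.get("threes", 0)
--             + scoreboard.get("fours", 0)
--             + scoreboard.get("fives", 0)
--             + scoreboard.get("sixes", 0))
-- ===== Notes on version B (the rewrite author's own statement) =====
-- stated objective: idiomatic
-- what changed: Instead of scanning every dict item with a membership test against the upper-section list (plus a redundant truthiness re-lookup), B is a single closed expression of six direct scoreboard.get(key, 0) lookups with no loop at all; skipped zero values contribute 0, so the sum is identical.
import Mathlib
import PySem

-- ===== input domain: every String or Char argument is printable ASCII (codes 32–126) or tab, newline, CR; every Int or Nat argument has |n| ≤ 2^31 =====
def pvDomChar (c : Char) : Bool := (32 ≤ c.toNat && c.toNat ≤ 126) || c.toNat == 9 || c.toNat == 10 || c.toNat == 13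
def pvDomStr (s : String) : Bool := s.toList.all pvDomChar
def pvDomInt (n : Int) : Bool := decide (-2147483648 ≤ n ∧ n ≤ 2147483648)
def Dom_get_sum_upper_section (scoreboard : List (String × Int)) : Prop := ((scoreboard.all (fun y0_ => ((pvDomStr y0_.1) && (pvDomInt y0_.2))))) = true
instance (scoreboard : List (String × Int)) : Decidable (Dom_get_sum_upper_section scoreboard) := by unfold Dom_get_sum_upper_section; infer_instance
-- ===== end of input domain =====

-- B replaces A's scan over all items (membership test + truthiness re-lookup) by a single
-- closed expression of six direct lookups; same sum (idiomatic rewrite).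

-- ===== PORT A =====
-- scoreboard[combo] is a lookup of a key known to be present (combo comes from items), so getD _ 0 is exact here.
def get_sum_upper_section (scoreboard : List (String × Int)) : Int :=
  let upper_section : List String := ["ones", "twos", "threes", "fours", "fives", "sixes"]
  let d : PySem.Dict String Int := PySem.Dict.mk scoreboard
  scoreboard.foldl (fun s p =>
    if p.1 ∈ upper_section then
      if d.getD p.1 0 ≠ 0 then s + p.2 else s
    else s) 0

-- ===== PORT B =====
def get_sum_upper_section_alt (scoreboard : List (String × Int)) : Int :=
  let d : PySem.Dict String Int := PySem.Dict.mk scoreboard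
  d.getD "ones" 0 + d.getD "twos" 0 + d.getD "threes" 0
    + d.getD "fours" 0 + d.getD "fives" 0 + d.getD "sixes" 0

-- ===== PRECONDITION & SPEC =====
-- Pre_ excludes association lists with duplicate keys: they do not encode any Python dict
-- (A's argument is a dict, whose keys are unique), so first-match behaviour there is no one's.
def Pre_get_sum_upper_section (scoreboard : List (String × Int)) : Prop :=
  (scoreboard.map Prod.fst).Nodup
instance (scoreboard : List (String × Int)) : Decidable (Pre_get_sum_upper_section scoreboard) := by
  unfold Pre_get_sum_upper_section; infer_instance

def pvWitness_get_sum_upper_section : (List (String × Int)) :=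
  [("ones", 3), ("twos", 0), ("chance", 25)]

def Spec_get_sum_upper_section (scoreboard : List (String × Int)) (out : Int) : Prop := out = get_sum_upper_section_alt scoreboard
instance (scoreboard : List (String × Int)) (out : Int) : Decidable (Spec_get_sum_upper_section scoreboard out) := by unfold Spec_get_sum_upper_section; infer_instance

-- ===== CLAIM (what is proved, stated in full; the proofs are below) =====
def Claim_equal_get_sum_upper_section : Prop := ∀ (scoreboard : List (String × Int)), Dom_get_sum_upper_section scoreboard → Pre_get_sum_upper_section scoreboard → Spec_get_sum_upper_section scoreboard (get_sum_upper_section scoreboard)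

-- ===== LEMMAS AND PROOFS =====

-- lookup of an item's own key in a duplicate-free dict yields its value
theorem pv_getD_mk_mem (sb : List (String × Int)) (hnd : (sb.map Prod.fst).Nodup)
    (p : String × Int) (hp : p ∈ sb) : (PySem.Dict.mk sb).getD p.1 0 = p.2 :=
  PySem.Dict.getD_of_mem_items (d := PySem.Dict.mk sb) (k := p.1) (v := p.2)
    (by simpa using hp) (by simpa [PySem.Dict.keys_mk] using hnd) 0

-- lookup of an absent key yields the default
theorem pv_getD_mk_not_mem (sb : List (String × Int)) (k : String)
    (h : k ∉ sb.map Prod.fst) : (PySem.Dict.mk sb).getD k 0 = 0 := by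
  apply PySem.Dict.getD_of_not_contains
  simp [PySem.Dict.contains_eq_decide_mem_keys, PySem.Dict.keys_mk, h]

-- summing an if-pattern over a duplicate-free key list, when f vanishes at the singled-out key
theorem pv_sum_if_single (u : List String) (hu : u.Nodup) (a : String) (x : Int)
    (f : String → Int) (hfa : f a = 0) :
    (u.map (fun k => if a = k then x else f k)).sum
      = (if a ∈ u then x else 0) + (u.map f).sum := by
  induction u with
  | nil => simp
  | cons k us ih =>
    rcases List.nodup_cons.mp hu with ⟨hk, hus⟩
    by_cases hak : a = k
    · subst hak
      have hmap : us.map (fun k' => if a = k' then x else f k') = us.map f := by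
        apply List.map_congr_left
        intro k' hk'
        have : ¬ (a = k') := fun h => hk (h ▸ hk')
        simp [this]
      simp [hmap, hfa]
    · rw [List.map_cons, List.map_cons, List.sum_cons, List.sum_cons, if_neg hak,
          ih hus]
      simp only [List.mem_cons, hak, false_or]
      ring

-- the sum of lookups over a duplicate-free key list equals the filtered-items sum
theorem pv_lookup_sum (u : List String) (hu : u.Nodup) :
    ∀ (sb : List (String × Int)), (sb.map Prod.fst).Nodup →
      (u.map (fun k => (PySem.Dict.mk sb).getD k 0)).sum
        = ((sb.filter (fun p => decide (p.1 ∈ u))).map Prod.snd).sum := by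
  intro sb
  induction sb with
  | nil =>
    intro _
    have h0 : ∀ k : String, (PySem.Dict.mk ([] : List (String × Int))).getD k 0 = 0 := by
      intro k; exact pv_getD_mk_not_mem [] k (by simp)
    simp [h0]
  | cons p rest ih =>
    intro hnd
    rw [List.map_cons] at hnd
    rcases List.nodup_cons.mp hnd with ⟨hp, hrest⟩
    have hmap : u.map (fun k => (PySem.Dict.mk (p :: rest)).getD k 0)
        = u.map (fun k => if p.1 = k then p.2 else (PySem.Dict.mk rest).getD k 0) := by
      apply List.map_congr_left; intro k _
      rw [PySem.Dict.getD_eq_get?_getD, PySem.Dict.get?_mk_cons]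
      by_cases h : p.1 = k
      · simp [h]
      · simp [h, PySem.Dict.getD_eq_get?_getD]
    rw [hmap, pv_sum_if_single u hu p.1 p.2 _ (pv_getD_mk_not_mem rest p.1 hp),
        ih hrest]
    by_cases hmem : p.1 ∈ u <;> simp [hmem]

-- A's item scan equals the filtered-items sum: fold invariant over a sublist l of sb
theorem pv_A_fold (sb : List (String × Int)) (hnd : (sb.map Prod.fst).Nodup)
    (u : List String) :
    ∀ (l : List (String × Int)) (acc : Int), (∀ p ∈ l, p ∈ sb) →
      l.foldl (fun s p =>
          if p.1 ∈ u then
            if (PySem.Dict.mk sb).getD p.1 0 ≠ 0 then s + p.2 else s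
          else s) acc
        = acc + ((l.filter (fun p => decide (p.1 ∈ u))).map Prod.snd).sum := by
  intro l
  induction l with
  | nil => intro acc _; simp
  | cons p rest ih =>
    intro acc hsub
    have hpv : (PySem.Dict.mk sb).getD p.1 0 = p.2 :=
      pv_getD_mk_mem sb hnd p (hsub p (by simp))
    have hrest : ∀ q ∈ rest, q ∈ sb := fun q hq => hsub q (by simp [hq])
    simp only [List.foldl_cons]
    by_cases hmem : p.1 ∈ u
    · by_cases hz : p.2 = 0
      · rw [if_pos hmem, if_neg (by rw [hpv]; simpa using hz), ih _ hrest]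
        simp [hmem, hz]
      · rw [if_pos hmem, if_pos (by rw [hpv]; exact hz), ih _ hrest]
        simp only [List.filter_cons, decide_eq_true_eq, hmem, if_pos, List.map_cons,
          List.sum_cons]
        ring
    · rw [if_neg hmem, ih _ hrest]
      simp [hmem]

-- ===== VERDICT (by name: the statement is the Claim_ definition above) =====
theorem get_sum_upper_section_spec : Claim_equal_get_sum_upper_section := by
  intro sb _ hpre
  unfold Spec_get_sum_upper_section get_sum_upper_section get_sum_upper_section_alt
  dsimp only []
  have hu : (["ones", "twos", "threes", "fours", "fives", "sixes"] : List String).Nodup := by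
    decide
  have hA := pv_A_fold sb hpre ["ones", "twos", "threes", "fours", "fives", "sixes"]
    sb 0 (fun _ h => h)
  have hB := pv_lookup_sum ["ones", "twos", "threes", "fours", "fives", "sixes"] hu sb hpre
  rw [hA, ← hB]
  simp [List.sum_cons]
  ring
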